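-- pv_equiv track=rewrite | github.com/Daria200/simple-mockforce | simple_mockforce/utils.py | find_object_and_index
-- ===== SOURCE A (Python) =====
-- def find_object_and_index(objects: list, pk_name: str, pk: str):
--     index = None
--     original = None
--     for idx, object_ in enumerate(objects):
--         if object_[pk_name] == pk:
--             index = idx
--             original = object_
--
--     assert index is not None and original, f"couldn't find anything for {pk}"
--     return original, index
-- ===== SOURCE B (Python) =====
-- def find_object_and_index(objects: list, pk_name: str, pk: str):
--     for idx in range(len(objects) - 1, -1, -1):
--         if objects[idx][pk_name] == pk:
--             return objects[idx], idx
--     assert False, f"couldn't find anything for {pk}"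
-- ===== Notes on version B (the rewrite author's own statement) =====
-- stated objective: alternative
-- what changed: Replaces the full left-to-right pass that keeps overwriting (index, original) with a reverse index scan that returns at the first (i.e. last-in-forward-order) match.
import Mathlib
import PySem

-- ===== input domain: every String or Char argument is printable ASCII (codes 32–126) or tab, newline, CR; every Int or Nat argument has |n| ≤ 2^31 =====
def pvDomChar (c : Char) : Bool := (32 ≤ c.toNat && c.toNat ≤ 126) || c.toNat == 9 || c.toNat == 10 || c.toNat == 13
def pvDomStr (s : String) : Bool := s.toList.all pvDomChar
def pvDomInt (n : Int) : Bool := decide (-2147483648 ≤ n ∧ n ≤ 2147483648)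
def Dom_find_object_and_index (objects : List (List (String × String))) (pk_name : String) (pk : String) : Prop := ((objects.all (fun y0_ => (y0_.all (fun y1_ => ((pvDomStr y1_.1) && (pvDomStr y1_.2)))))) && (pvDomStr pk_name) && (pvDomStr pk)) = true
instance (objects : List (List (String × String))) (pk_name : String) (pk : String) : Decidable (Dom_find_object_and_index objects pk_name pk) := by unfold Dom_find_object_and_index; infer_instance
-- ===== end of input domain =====

-- B differs from A by scanning the indices in reverse and returning at the first (= last-in-forward-order) match instead of overwriting state across a full pass; same return value everywhere A returns.

-- ===== PORT A =====
-- `object_[pk_name]`: Python dict subscript = first-match lookup (none = KeyError, excluded by Pre_)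
def pvObjGet? (o : List (String × String)) (k : String) : Option String :=
  (PySem.Dict.mk o).get? k

def find_object_and_index (objects : List (List (String × String))) (pk_name : String) (pk : String) : (List (String × String)) × Int :=
  -- index = None; original = None; for idx, object_ in enumerate(objects): if object_[pk_name] == pk: index = idx; original = object_
  let st := (PySem.List.enumerate objects 0).foldl
    (fun (st : Option Int × Option (List (String × String))) p =>
      match pvObjGet? p.2 pk_name with
      | some v => if v == pk then (some p.1, some p.2) else st
      | none => st)  -- KeyError: excluded by Pre_
    (none, none)
  -- assert index is not None and original; return original, index
  match st with
  | (some i, some o) => (o, i)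
  | _ => ([], 0)  -- AssertionError: excluded by Pre_

-- ===== PORT B =====
def find_object_and_index_alt (objects : List (List (String × String))) (pk_name : String) (pk : String) : (List (String × String)) × Int :=
  -- for idx in range(len(objects)-1, -1, -1): if objects[idx][pk_name] == pk: return objects[idx], idx
  match (PySem.List.pyRange ((objects.length : Int) - 1) (-1) (-1)).findSome?
    (fun idx =>
      match PySem.List.pyGet? objects idx with
      | some o => if pvObjGet? o pk_name == some pk then some (o, idx) else none
      | none => none) with
  | some r => r
  | none => ([], 0)  -- assert False: excluded by Pre_

-- ===== PRECONDITION & SPEC =====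
-- Pre_ = exactly the inputs where Python A returns: every object has the key pk_name
-- (else KeyError) and some object's value for it equals pk (else the assert fails).
def Pre_find_object_and_index (objects : List (List (String × String))) (pk_name : String) (pk : String) : Prop :=
  (∀ o ∈ objects, (pvObjGet? o pk_name).isSome) ∧ (∃ o ∈ objects, pvObjGet? o pk_name = some pk)

instance (objects : List (List (String × String))) (pk_name : String) (pk : String) : Decidable (Pre_find_object_and_index objects pk_name pk) := by unfold Pre_find_object_and_index; infer_instance

def pvWitness_find_object_and_index : (List (List (String × String))) × String × String :=
  ([[("id", "1")], [("id", "2")]], "id", "2")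

def Spec_find_object_and_index (objects : List (List (String × String))) (pk_name : String) (pk : String) (out : (List (String × String)) × Int) : Prop := out = find_object_and_index_alt objects pk_name pk
instance (objects : List (List (String × String))) (pk_name : String) (pk : String) (out : (List (String × String)) × Int) : Decidable (Spec_find_object_and_index objects pk_name pk out) := by unfold Spec_find_object_and_index; infer_instance

-- ===== CLAIM (what is proved, stated in full; the proofs are below) =====
def Claim_equal_find_object_and_index : Prop := ∀ (objects : List (List (String × String))) (pk_name : String) (pk : String), Dom_find_object_and_index objects pk_name pk → Pre_find_object_and_index objects pk_name pk → Spec_find_object_and_index objects pk_name pk (find_object_and_index objects pk_name pk)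

-- ===== LEMMAS AND PROOFS =====

theorem pv_findSome?_congr {α β : Type} (f g : α → Option β) (l : List α)
    (h : ∀ x ∈ l, f x = g x) : l.findSome? f = l.findSome? g := by
  induction l with
  | nil => rfl
  | cons a l ih =>
    simp only [List.findSome?_cons, h a (List.mem_cons_self)]
    cases g a with
    | none => exact ih (fun x hx => h x (List.mem_cons_of_mem _ hx))
    | some b => rfl

-- B's intermediate search result on a given list
def pvB (objects : List (List (String × String))) (pk_name : String) (pk : String) :
    Option ((List (String × String)) × Int) :=
  (PySem.List.pyRange ((objects.length : Int) - 1) (-1) (-1)).findSome?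
    (fun idx =>
      match PySem.List.pyGet? objects idx with
      | some o => if pvObjGet? o pk_name == some pk then some (o, idx) else none
      | none => none)

-- A's intermediate fold state on a given list
def pvA (objects : List (List (String × String))) (pk_name : String) (pk : String) :
    Option Int × Option (List (String × String)) :=
  (PySem.List.enumerate objects 0).foldl
    (fun st p =>
      match pvObjGet? p.2 pk_name with
      | some v => if v == pk then (some p.1, some p.2) else st
      | none => st)
    (none, none)

theorem pv_state_eq (pk_name pk : String) :
    ∀ objects : List (List (String × String)),
      pvA objects pk_name pk =
        ((pvB objects pk_name pk).map (·.2), (pvB objects pk_name pk).map (·.1)) := by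
  intro objects
  induction objects using List.reverseRecOn with
  | nil => rfl
  | append_singleton xs x ih =>
    have hlen : ((xs ++ [x]).length : Int) - 1 = (xs.length : Int) := by
      simp
    -- B side: peel off the top index
    have hcons : PySem.List.pyRange ((xs.length : Int)) (-1) (-1)
        = (xs.length : Int) :: PySem.List.pyRange ((xs.length : Int) - 1) (-1) (-1) :=
      PySem.List.pyRange_neg_one_cons (by omega)
    have hgetx : PySem.List.pyGet? (xs ++ [x]) (xs.length : Int) = some x :=
      PySem.List.pyGet?_append_length xs [] x
    have hrest : ∀ idx ∈ PySem.List.pyRange ((xs.length : Int) - 1) (-1) (-1),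
        PySem.List.pyGet? (xs ++ [x]) idx = PySem.List.pyGet? xs idx := by
      intro idx hm
      rw [PySem.List.mem_pyRange_neg_one] at hm
      obtain ⟨h1, h2⟩ := hm
      have h0 : 0 ≤ idx := by omega
      rw [PySem.List.pyGet?_of_nonneg _ h0, PySem.List.pyGet?_of_nonneg _ h0,
        List.getElem?_append_left]
      omega
    have hB : pvB (xs ++ [x]) pk_name pk =
        if pvObjGet? x pk_name == some pk then some (x, (xs.length : Int))
        else pvB xs pk_name pk := by
      unfold pvB
      rw [hlen, hcons, List.findSome?_cons, hgetx]
      by_cases hmx : (pvObjGet? x pk_name == some pk) = true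
      · simp [hmx]
      · have hmx' : (pvObjGet? x pk_name == some pk) = false := by simpa using hmx
        simp only [hmx', Bool.false_eq_true, if_false]
        exact pv_findSome?_congr _ _ _ (fun idx hm => by rw [hrest idx hm])
    have hA : pvA (xs ++ [x]) pk_name pk =
        (match pvObjGet? x pk_name with
         | some v => if v == pk then (some (xs.length : Int), some x) else pvA xs pk_name pk
         | none => pvA xs pk_name pk) := by
      unfold pvA
      rw [PySem.List.enumerate_append, List.foldl_append]
      simp [PySem.List.enumerate]
    rw [hA, hB]
    cases hv : pvObjGet? x pk_name with
    | none => simpa using ih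
    | some v =>
      by_cases hvpk : v = pk
      · subst hvpk
        simp
      · simpa [hvpk] using ih

theorem pv_eq (objects : List (List (String × String))) (pk_name pk : String) :
    find_object_and_index objects pk_name pk = find_object_and_index_alt objects pk_name pk := by
  have h := pv_state_eq pk_name pk objects
  show (match pvA objects pk_name pk with
        | (some i, some o) => (o, i)
        | _ => ([], 0)) =
       (match pvB objects pk_name pk with
        | some r => r
        | none => ([], 0))
  rw [h]
  cases pvB objects pk_name pk with
  | none => rfl
  | some r => rfl

-- ===== VERDICT (by name: the statement is the Claim_ definition above) =====
theorem find_object_and_index_spec : Claim_equal_find_object_and_index := by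
  intro objects pk_name pk _ _
  exact pv_eq objects pk_name pk
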